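-- pv_equiv track=rewrite | github.com/yiyunya/MultiSRL | train.py | get_verb_index
-- ===== SOURCE A (Python) =====
-- def get_verb_index(verb_index, sindex, eindex, svindex):
--     evindex = 0
--     i = eindex - 1
--     while i > sindex:
--         if i in verb_index:
--             evindex = len(verb_index) - verb_index[::-1].index(i)
--             return evindex
--         i = i - 1
--     return svindex
-- ===== SOURCE B (Python) =====
-- def get_verb_index(verb_index, sindex, eindex, svindex):
--     found = False
--     best_val = 0
--     best_idx = 0
--     for idx, v in enumerate(verb_index):
--         if sindex < v < eindex:
--             if not found or best_val <= v:
--                 found = True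
--                 best_val = v
--                 best_idx = idx
--     return best_idx + 1 if found else svindex
-- ===== Notes on version B (the rewrite author's own statement) =====
-- stated objective: alternative
-- what changed: Replaced A's descending scan over the integer value range (eindex-1 down to sindex+1, each step a membership test and, on a hit, a reverse .index pass) by a single forward pass over the list that maintains the running maximum in (sindex, eindex) and the last index where it occurs; B's cost is O(n) independent of the width of the range, while A's is O((eindex-sindex)*n).
import Mathlib
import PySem

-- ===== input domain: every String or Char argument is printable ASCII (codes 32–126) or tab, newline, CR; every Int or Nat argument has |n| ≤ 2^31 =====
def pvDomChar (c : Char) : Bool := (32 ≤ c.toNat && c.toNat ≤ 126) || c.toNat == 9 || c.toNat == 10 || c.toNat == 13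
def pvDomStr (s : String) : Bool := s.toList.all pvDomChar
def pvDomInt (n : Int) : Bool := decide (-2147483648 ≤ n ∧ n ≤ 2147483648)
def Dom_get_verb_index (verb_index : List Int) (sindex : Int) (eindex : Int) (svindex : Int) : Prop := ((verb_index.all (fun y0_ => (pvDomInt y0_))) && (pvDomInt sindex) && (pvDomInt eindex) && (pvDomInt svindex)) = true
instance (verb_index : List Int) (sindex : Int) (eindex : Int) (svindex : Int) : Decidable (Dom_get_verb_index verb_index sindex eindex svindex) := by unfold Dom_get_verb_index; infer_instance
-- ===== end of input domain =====

-- B replaces A's descending scan over the value range (with a reverse .index pass on a hit)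
-- by a single forward pass over the list keeping the running max and its last index (objective: alternative).

-- ===== PORT A =====
-- while i > sindex: …; i = i - 1   — fuel = number of remaining iterations, i = sindex + fuel,
-- so 'i > sindex' is exactly 'fuel > 0'.  verb_index[::-1] is verb_index.reverse (exact);
-- .index is PySem.List.index?, whose 'some' is guaranteed by the guarding 'i in verb_index'.
def get_verb_index_loopA (verb_index : List Int) (svindex : Int) : Nat → Int → Int
  | 0, _ => svindex
  | fuel + 1, i =>
    if verb_index.contains i then
      (verb_index.length : Int) - (((PySem.List.index? verb_index.reverse i).getD 0 : Nat) : Int)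
    else
      get_verb_index_loopA verb_index svindex fuel (i - 1)

def get_verb_index (verb_index : List Int) (sindex : Int) (eindex : Int) (svindex : Int) : Int :=
  get_verb_index_loopA verb_index svindex (eindex - 1 - sindex).toNat (eindex - 1)

-- ===== PORT B =====
-- for idx, v in enumerate(verb_index): … — state (found, best_val, best_idx)
def get_verb_index_loopB (sindex eindex : Int) : List Int → Int → (Bool × Int × Int) → (Bool × Int × Int)
  | [], _, st => st
  | v :: tl, idx, (found, bv, bi) =>
    get_verb_index_loopB sindex eindex tl (idx + 1)
      (if sindex < v ∧ v < eindex then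
        (if found = false ∨ bv ≤ v then (true, v, idx) else (found, bv, bi))
       else (found, bv, bi))

def get_verb_index_alt (verb_index : List Int) (sindex : Int) (eindex : Int) (svindex : Int) : Int :=
  match get_verb_index_loopB sindex eindex verb_index 0 (false, 0, 0) with
  | (true, _, bi) => bi + 1
  | (false, _, _) => svindex

-- ===== PRECONDITION & SPEC =====
def Spec_get_verb_index (verb_index : List Int) (sindex : Int) (eindex : Int) (svindex : Int) (out : Int) : Prop := out = get_verb_index_alt verb_index sindex eindex svindex
instance (verb_index : List Int) (sindex : Int) (eindex : Int) (svindex : Int) (out : Int) : Decidable (Spec_get_verb_index verb_index sindex eindex svindex out) := by unfold Spec_get_verb_index; infer_instance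

-- ===== CLAIM (what is proved, stated in full; the proofs are below) =====
def Claim_equal_get_verb_index : Prop := ∀ (verb_index : List Int) (sindex : Int) (eindex : Int) (svindex : Int), Dom_get_verb_index verb_index sindex eindex svindex → Spec_get_verb_index verb_index sindex eindex svindex (get_verb_index verb_index sindex eindex svindex)

-- ===== LEMMAS AND PROOFS =====

-- index (from the front) of the LAST occurrence of M in the list (junk 0 when M absent)
def gvLastPos (M : Int) : List Int → Nat
  | [] => 0
  | v :: tl => if M ∈ tl then gvLastPos M tl + 1 else if v = M then 0 else 0

-- what A returns, as a function of the max candidate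
def gvAnswer (vi : List Int) (sv : Int) : Option Int → Int
  | none => sv
  | some M => (vi.length : Int) - (((PySem.List.index? vi.reverse M).getD 0 : Nat) : Int)

-- what B's loop returns from state (f, bv, bi), as a function of the max candidate of the rest
def gvStep (f : Bool) (bv bi idx : Int) (vi : List Int) : Option Int → Bool × Int × Int
  | none => (f, bv, bi)
  | some M => if f = true ∧ M < bv then (f, bv, bi) else (true, M, idx + (gvLastPos M vi : Int))

lemma gvLastPos_lt (M : Int) (l : List Int) (h : M ∈ l) : gvLastPos M l < l.length := by
  induction l with
  | nil => cases h
  | cons v tl ih =>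
    simp only [gvLastPos]
    by_cases hm : M ∈ tl
    · simp only [hm, if_true, List.length_cons]
      have := ih hm
      omega
    · have hv : v = M := by
        rcases List.mem_cons.mp h with h' | h'
        · omega
        · exact absurd h' hm
      simp [hm, hv]

lemma gv_rev_index (M : Int) (l : List Int) (h : M ∈ l) :
    PySem.List.index? l.reverse M = some (l.length - 1 - gvLastPos M l) := by
  induction l with
  | nil => cases h
  | cons v tl ih =>
    simp only [List.reverse_cons, gvLastPos]
    by_cases hm : M ∈ tl
    · rw [PySem.List.index?_append_of_mem _ (by simpa using hm), ih hm]
      have := gvLastPos_lt M tl hm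
      simp only [hm, if_true, List.length_cons]
      congr 1
      omega
    · have hv : v = M := by
        rcases List.mem_cons.mp h with h' | h'
        · omega
        · exact absurd h' hm
      subst hv
      rw [PySem.List.index?_append_singleton_self tl.reverse v (by simpa using hm)]
      simp [hm]

lemma gv_le_max {l : List Int} {M x : Int} (h : l.max? = some M) (hx : x ∈ l) : x ≤ M :=
  (List.max?_le_iff h).mp le_rfl x hx

-- characterization of A's loop
lemma gv_loopA_eq (vi : List Int) (s sv : Int) : ∀ fuel : Nat,
    get_verb_index_loopA vi sv fuel (s + fuel) =
      gvAnswer vi sv (vi.filter (fun v => decide (s < v ∧ v ≤ s + (fuel : Int)))).max? := by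
  intro fuel
  induction fuel generalizing s with
  | zero =>
    have hfil : vi.filter (fun v => decide (s < v ∧ v ≤ s + ((0 : Nat) : Int))) = [] := by
      rw [List.filter_eq_nil_iff]
      intro v _
      simp only [decide_eq_true_eq]
      omega
    rw [hfil]
    simp [get_verb_index_loopA, gvAnswer]
  | succ fuel ih =>
    simp only [get_verb_index_loopA]
    by_cases hmem : (s + ((fuel + 1 : Nat) : Int)) ∈ vi
    · rw [if_pos (by simpa using hmem)]
      have hmax : (vi.filter (fun v => decide (s < v ∧ v ≤ s + ((fuel + 1 : Nat) : Int)))).max? =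
          some (s + ((fuel + 1 : Nat) : Int)) := by
        have hinf : (s + ((fuel + 1 : Nat) : Int)) ∈
            vi.filter (fun v => decide (s < v ∧ v ≤ s + ((fuel + 1 : Nat) : Int))) := by
          refine List.mem_filter.mpr ⟨hmem, ?_⟩
          simp only [decide_eq_true_eq]
          omega
        rcases hm : (vi.filter (fun v => decide (s < v ∧ v ≤ s + ((fuel + 1 : Nat) : Int)))).max? with _ | M
        · rw [List.max?_eq_none_iff.mp hm] at hinf
          cases hinf
        · have h1 := List.max?_mem hm
          have h2 : M ≤ s + ((fuel + 1 : Nat) : Int) := by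
            have := (List.mem_filter.mp h1).2
            rw [decide_eq_true_eq] at this
            exact this.2
          have h3 := gv_le_max hm hinf
          congr 1
          omega
      rw [hmax]
      simp only [gvAnswer]
    · rw [if_neg (by simpa using hmem)]
      have hfeq : vi.filter (fun v => decide (s < v ∧ v ≤ s + ((fuel + 1 : Nat) : Int))) =
          vi.filter (fun v => decide (s < v ∧ v ≤ s + ((fuel : Nat) : Int))) := by
        apply List.filter_congr
        intro v hv
        have hne : v ≠ s + ((fuel + 1 : Nat) : Int) := fun h => hmem (h ▸ hv)
        simp only [decide_eq_decide]
        push_cast at hne ⊢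
        omega
      have harg : s + ((fuel + 1 : Nat) : Int) - 1 = s + ((fuel : Nat) : Int) := by
        push_cast
        ring
      rw [hfeq, harg, ih s]

-- characterization of B's loop
lemma gv_loopB_eq (s e : Int) (vi : List Int) : ∀ (idx : Int) (f : Bool) (bv bi : Int),
    get_verb_index_loopB s e vi idx (f, bv, bi) =
      gvStep f bv bi idx vi (vi.filter (fun v => decide (s < v ∧ v < e))).max? := by
  induction vi with
  | nil =>
    intro idx f bv bi
    simp [get_verb_index_loopB, gvStep]
  | cons v tl ih =>
    intro idx f bv bi
    have hfc : (v :: tl).filter (fun v => decide (s < v ∧ v < e)) =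
        if s < v ∧ v < e then v :: tl.filter (fun v => decide (s < v ∧ v < e))
        else tl.filter (fun v => decide (s < v ∧ v < e)) := by
      by_cases hc : s < v ∧ v < e
      · rw [if_pos hc, List.filter_cons, if_pos (by simpa using hc)]
      · rw [if_neg hc, List.filter_cons, if_neg (by simpa using hc)]
    simp only [get_verb_index_loopB, hfc]
    by_cases hc : s < v ∧ v < e
    · rw [if_pos hc, if_pos hc]
      by_cases hupd : f = false ∨ bv ≤ v
      · rw [if_pos hupd, ih]
        have hcond : ¬ (f = true ∧ v < bv) := by
          rcases hupd with h | h
          · simp [h]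
          · rintro ⟨_, h2⟩
            omega
        rcases hmax : (tl.filter (fun v => decide (s < v ∧ v < e))).max? with _ | Mtl
        · -- tail has no candidate; v itself is the max, and v ∉ tl
          have hvnt : v ∉ tl := by
            intro hvt
            have : v ∈ tl.filter (fun v => decide (s < v ∧ v < e)) :=
              List.mem_filter.mpr ⟨hvt, by simpa using hc⟩
            rw [List.max?_eq_none_iff.mp hmax] at this
            cases this
          have h0 : gvLastPos v (v :: tl) = 0 := by simp [gvLastPos, hvnt]
          rw [List.max?_cons, hmax]
          simp only [Option.elim_none, gvStep, h0]
          rw [if_neg hcond]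
          simp
        · have hMtl_mem : Mtl ∈ tl := (List.mem_filter.mp (List.max?_mem hmax)).1
          rw [List.max?_cons, hmax]
          simp only [Option.elim_some, gvStep]
          by_cases hvM : v ≤ Mtl
          · rw [max_eq_right hvM]
            rw [if_neg (by rintro ⟨_, h2⟩; omega)]
            have hcond2 : ¬ (f = true ∧ Mtl < bv) := by
              rcases hupd with h | h
              · simp [h]
              · rintro ⟨_, h2⟩
                omega
            rw [if_neg hcond2]
            have hlp : gvLastPos Mtl (v :: tl) = gvLastPos Mtl tl + 1 := by
              simp [gvLastPos, hMtl_mem]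
            rw [hlp]
            have : idx + 1 + ((gvLastPos Mtl tl : Nat) : Int) = idx + (((gvLastPos Mtl tl + 1 : Nat) : Int)) := by
              push_cast
              ring
            rw [this]
          · have hvg : Mtl < v := by omega
            rw [max_eq_left (le_of_lt hvg)]
            have hvnt : v ∉ tl := by
              intro hvt
              have : v ∈ tl.filter (fun v => decide (s < v ∧ v < e)) :=
                List.mem_filter.mpr ⟨hvt, by simpa using hc⟩
              exact absurd (gv_le_max hmax this) (by omega)
            have h0 : gvLastPos v (v :: tl) = 0 := by simp [gvLastPos, hvnt]
            rw [if_pos (⟨by trivial, hvg⟩ : _ ∧ _), if_neg hcond, h0]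
            simp
      · rw [if_neg hupd, ih]
        have hf : f = true := by
          cases f
          · exact absurd (Or.inl rfl) hupd
          · rfl
        have hbv : v < bv := by
          by_contra h
          exact hupd (Or.inr (by omega))
        rcases hmax : (tl.filter (fun v => decide (s < v ∧ v < e))).max? with _ | Mtl
        · rw [List.max?_cons, hmax]
          simp only [Option.elim_none, gvStep]
          rw [if_pos ⟨hf, hbv⟩]
        · have hMtl_mem : Mtl ∈ tl := (List.mem_filter.mp (List.max?_mem hmax)).1
          rw [List.max?_cons, hmax]
          simp only [Option.elim_some, gvStep]
          by_cases hvM : v ≤ Mtl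
          · rw [max_eq_right hvM]
            by_cases hM : Mtl < bv
            · rw [if_pos ⟨hf, hM⟩, if_pos ⟨hf, hM⟩]
            · rw [if_neg (by rintro ⟨_, h2⟩; omega), if_neg (by rintro ⟨_, h2⟩; omega)]
              have hlp : gvLastPos Mtl (v :: tl) = gvLastPos Mtl tl + 1 := by
                simp [gvLastPos, hMtl_mem]
              rw [hlp]
              have : idx + 1 + ((gvLastPos Mtl tl : Nat) : Int) = idx + (((gvLastPos Mtl tl + 1 : Nat) : Int)) := by
                push_cast
                ring
              rw [this]
          · rw [max_eq_left (by omega)]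
            rw [if_pos ⟨hf, by omega⟩, if_pos ⟨hf, hbv⟩]
    · rw [if_neg hc, if_neg hc, ih]
      rcases hmax : (tl.filter (fun v => decide (s < v ∧ v < e))).max? with _ | Mtl
      · simp only [gvStep]
      · have hMtl_mem : Mtl ∈ tl := (List.mem_filter.mp (List.max?_mem hmax)).1
        simp only [gvStep]
        by_cases hcond : f = true ∧ Mtl < bv
        · rw [if_pos hcond, if_pos hcond]
        · rw [if_neg hcond, if_neg hcond]
          have hlp : gvLastPos Mtl (v :: tl) = gvLastPos Mtl tl + 1 := by
            simp [gvLastPos, hMtl_mem]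
          rw [hlp]
          have : idx + 1 + ((gvLastPos Mtl tl : Nat) : Int) = idx + (((gvLastPos Mtl tl + 1 : Nat) : Int)) := by
            push_cast
            ring
          rw [this]

-- A in terms of the common description
lemma gv_A_eq (vi : List Int) (s e sv : Int) :
    get_verb_index vi s e sv =
      gvAnswer vi sv (vi.filter (fun v => decide (s < v ∧ v < e))).max? := by
  unfold get_verb_index
  by_cases hse : e - 1 ≤ s
  · have h0 : (e - 1 - s).toNat = 0 := by omega
    have hfil : vi.filter (fun v => decide (s < v ∧ v < e)) = [] := by
      rw [List.filter_eq_nil_iff]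
      intro v _
      simp only [decide_eq_true_eq]
      omega
    rw [h0, hfil]
    simp [get_verb_index_loopA, gvAnswer]
  · obtain ⟨n, hn⟩ : ∃ n : Nat, (e - 1 - s).toNat = n := ⟨_, rfl⟩
    have harg : e - 1 = s + (n : Int) := by omega
    rw [hn, harg, gv_loopA_eq vi s sv n]
    have hfil : vi.filter (fun v => decide (s < v ∧ v ≤ s + (n : Int))) =
        vi.filter (fun v => decide (s < v ∧ v < e)) := by
      apply List.filter_congr
      intro v _
      simp only [decide_eq_decide]
      constructor
      · rintro ⟨h1, h2⟩
        exact ⟨h1, by omega⟩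
      · rintro ⟨h1, h2⟩
        exact ⟨h1, by omega⟩
    rw [hfil]

-- ===== VERDICT (by name: the statement is the Claim_ definition above) =====
theorem get_verb_index_spec : Claim_equal_get_verb_index := by
  intro vi s e sv _
  unfold Spec_get_verb_index
  rw [gv_A_eq]
  unfold get_verb_index_alt
  rw [gv_loopB_eq]
  rcases hmax : (vi.filter (fun v => decide (s < v ∧ v < e))).max? with _ | M
  · simp only [gvStep, gvAnswer]
  · have hM_mem : M ∈ vi := (List.mem_filter.mp (List.max?_mem hmax)).1
    simp only [gvStep, gvAnswer]
    rw [if_neg (by simp)]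
    simp only
    rw [gv_rev_index M vi hM_mem]
    have := gvLastPos_lt M vi hM_mem
    simp only [Option.getD_some]
    push_cast [Nat.sub_sub]
    omega
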